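-- pv_equiv track=rewrite | github.com/THEOLEX-IO/legal_doc_processing | legal_doc_processing/downloader/filters.py | get_document_link
-- ===== SOURCE A (Python) =====
-- def get_document_link(doc_list):
--     docs = [doc for doc in doc_list if "press-release" not in doc]
--     accepted_words = ["deferred", "order", "complaint", "agreement", "indictment"]
--     for word in accepted_words:
--         for doc in doc_list:
--             if word in doc:
--                 return doc
--
--     return docs[0] if docs else None
-- ===== SOURCE B (Python) =====
-- def get_document_link(doc_list):
--     accepted_words = ["deferred", "order", "complaint", "agreement", "indictment"]
--     n = len(accepted_words)
--     best = None  # (key, doc) with smallest key; earliest doc wins ties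
--     for doc in doc_list:
--         key = next((i for i, w in enumerate(accepted_words) if w in doc), n)
--         if key < n and (best is None or key < best[0]):
--             best = (key, doc)
--     if best is not None:
--         return best[1]
--     docs = [doc for doc in doc_list if "press-release" not in doc]
--     return docs[0] if docs else None
-- ===== Notes on version B (the rewrite author's own statement) =====
-- stated objective: idiomatic
-- what changed: Replaced A's word-major repeated scans (one full pass over doc_list per keyword) by a single doc-major pass that keys each doc by its best keyword index and keeps the minimum (key, earliest position), computing the press-release fallback only when no keyword matched.
import Mathlib
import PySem

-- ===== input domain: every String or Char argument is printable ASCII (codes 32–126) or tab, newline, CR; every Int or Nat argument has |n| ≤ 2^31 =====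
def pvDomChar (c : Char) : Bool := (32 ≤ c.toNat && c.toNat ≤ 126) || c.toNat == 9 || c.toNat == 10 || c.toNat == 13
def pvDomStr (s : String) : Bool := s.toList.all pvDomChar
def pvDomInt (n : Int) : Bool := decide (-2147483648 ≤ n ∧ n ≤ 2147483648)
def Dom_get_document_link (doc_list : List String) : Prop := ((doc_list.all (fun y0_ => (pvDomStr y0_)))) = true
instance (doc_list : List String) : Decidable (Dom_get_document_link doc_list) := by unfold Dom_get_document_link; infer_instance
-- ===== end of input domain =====

-- B replaces A's keyword-major repeated scans of doc_list by one doc-major pass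
-- keeping the doc with the smallest keyword-index key (idiomatic single pass; same cost class).

-- ===== PORT A =====
def pvAcceptedWords : List String := ["deferred", "order", "complaint", "agreement", "indictment"]

-- the nested 'for word: for doc: if word in doc: return doc' loops
def pvAWordLoop (words : List String) (doc_list : List String) : Option String :=
  match words with
  | [] => none
  | w :: ws =>
    match doc_list.find? (fun doc => PySem.Str.isIn w doc) with
    | some doc => some doc
    | none => pvAWordLoop ws doc_list

def get_document_link (doc_list : List String) : Option String :=
  let docs := doc_list.filter (fun doc => !(PySem.Str.isIn "press-release" doc))
  match pvAWordLoop pvAcceptedWords doc_list with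
  | some doc => some doc
  | none => docs.head?

-- ===== PORT B =====
-- key of a doc = index of the first keyword it contains (sentinel = words.length)
def pvKeyOf (words : List String) (doc : String) : Nat :=
  match words with
  | [] => 0
  | w :: ws => if PySem.Str.isIn w doc then 0 else pvKeyOf ws doc + 1

-- one step of B's loop: keep the best (smallest-key, earliest) candidate
def pvBStep (ws : List String) (best : Option (Nat × String)) (doc : String) :
    Option (Nat × String) :=
  let k := pvKeyOf ws doc
  if k < ws.length then
    match best with
    | none => some (k, doc)
    | some (k0, d0) => if k < k0 then some (k, doc) else some (k0, d0)
  else best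

def get_document_link_alt (doc_list : List String) : Option String :=
  match doc_list.foldl (pvBStep pvAcceptedWords) none with
  | some (_, d) => some d
  | none =>
    match doc_list.filter (fun doc => !(PySem.Str.isIn "press-release" doc)) with
    | [] => none
    | d :: _ => some d

-- ===== PRECONDITION & SPEC =====
def Spec_get_document_link (doc_list : List String) (out : Option String) : Prop := out = get_document_link_alt doc_list
instance (doc_list : List String) (out : Option String) : Decidable (Spec_get_document_link doc_list out) := by unfold Spec_get_document_link; infer_instance

-- ===== CLAIM (what is proved, stated in full; the proofs are below) =====
def Claim_equal_get_document_link : Prop := ∀ (doc_list : List String), Dom_get_document_link doc_list → Spec_get_document_link doc_list (get_document_link doc_list)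

-- ===== LEMMAS AND PROOFS =====

-- reference function: earliest doc with minimal key, doc-major structural recursion
def pvBest (ws : List String) : List String → Option (Nat × String)
  | [] => none
  | d :: docs =>
    let k := pvKeyOf ws d
    let r := pvBest ws docs
    if k < ws.length then
      match r with
      | none => some (k, d)
      | some (k', d') => if k ≤ k' then some (k, d) else some (k', d')
    else r

theorem pvBest_cons_word (w : String) (ws : List String) (docs : List String) :
    pvBest (w :: ws) docs =
      match docs.find? (fun d => PySem.Str.isIn w d) with
      | some d => some (0, d)
      | none => (pvBest ws docs).map (fun p => (p.1 + 1, p.2)) := by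
  induction docs with
  | nil => rfl
  | cons d docs ih =>
    have hkey : pvKeyOf (w :: ws) d
        = if PySem.Str.isIn w d then 0 else pvKeyOf ws d + 1 := rfl
    by_cases hw : PySem.Str.isIn w d = true
    · rw [List.find?_cons_of_pos hw]
      have hk0 : pvKeyOf (w :: ws) d = 0 := by rw [hkey, if_pos hw]
      simp only [pvBest, hk0]
      rw [if_pos (by simp only [List.length_cons]; omega : (0:Nat) < (w :: ws).length)]
      cases pvBest (w :: ws) docs with
      | none => rfl
      | some p => obtain ⟨k', d'⟩ := p; simp
    · rw [List.find?_cons_of_neg (by simpa using hw)]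
      have hk1 : pvKeyOf (w :: ws) d = pvKeyOf ws d + 1 := by rw [hkey, if_neg hw]
      cases hfd : List.find? (fun x => PySem.Str.isIn w x) docs with
      | some e =>
        have hbd : pvBest (w :: ws) docs = some (0, e) := by rw [ih, hfd]
        simp only [pvBest, hk1, hbd]
        split <;> simp
      | none =>
        have hbd : pvBest (w :: ws) docs
            = (pvBest ws docs).map (fun p => (p.1 + 1, p.2)) := by rw [ih, hfd]
        simp only [pvBest, hk1, hbd]
        cases hb : pvBest ws docs with
        | none =>
          by_cases hk : pvKeyOf ws d < ws.length
          · rw [if_pos (by simp only [List.length_cons]; omega :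
                pvKeyOf ws d + 1 < (w :: ws).length), if_pos hk]
            simp
          · rw [if_neg (by simp only [List.length_cons]; omega :
                ¬ pvKeyOf ws d + 1 < (w :: ws).length), if_neg hk]
        | some p =>
          obtain ⟨k', d'⟩ := p
          by_cases hk : pvKeyOf ws d < ws.length
          · rw [if_pos (by simp only [List.length_cons]; omega :
                pvKeyOf ws d + 1 < (w :: ws).length), if_pos hk]
            by_cases hle : pvKeyOf ws d ≤ k'
            · have h2 : pvKeyOf ws d + 1 ≤ k' + 1 := by omega
              simp [hle, h2]
            · have h2 : ¬ pvKeyOf ws d + 1 ≤ k' + 1 := by omega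
              simp [hle, h2]
          · rw [if_neg (by simp only [List.length_cons]; omega :
                ¬ pvKeyOf ws d + 1 < (w :: ws).length), if_neg hk]

theorem pvBest_nil_words (docs : List String) : pvBest [] docs = none := by
  induction docs with
  | nil => rfl
  | cons d docs ih => simp only [pvBest, ih]; rfl

theorem pvAWordLoop_eq_best (ws : List String) (docs : List String) :
    pvAWordLoop ws docs = (pvBest ws docs).map (·.2) := by
  induction ws with
  | nil => rw [pvBest_nil_words]; rfl
  | cons w ws ih =>
    rw [pvAWordLoop, pvBest_cons_word]
    cases hfind : docs.find? (fun d => PySem.Str.isIn w d) with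
    | some e => rfl
    | none => simp only [ih, Option.map_map]; rfl

theorem pvFold_some (ws : List String) (docs : List String) (k0 : Nat) (d0 : String) :
    docs.foldl (pvBStep ws) (some (k0, d0)) =
      match pvBest ws docs with
      | none => some (k0, d0)
      | some (k, d) => if k < k0 then some (k, d) else some (k0, d0) := by
  induction docs generalizing k0 d0 with
  | nil => rfl
  | cons d docs ih =>
    simp only [List.foldl_cons, pvBStep, pvBest]
    by_cases hk : pvKeyOf ws d < ws.length
    · rw [if_pos hk, if_pos hk]
      by_cases hlt : pvKeyOf ws d < k0
      · rw [if_pos hlt, ih]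
        cases hb : pvBest ws docs with
        | none => simp [hlt]
        | some p =>
          obtain ⟨k', d'⟩ := p
          by_cases h1 : pvKeyOf ws d ≤ k'
          · have h2 : ¬ k' < pvKeyOf ws d := by omega
            simp [h1, h2, hlt]
          · have h2 : k' < pvKeyOf ws d := by omega
            have h3 : k' < k0 := by omega
            simp [h1, h2, h3]
      · rw [if_neg hlt, ih]
        cases hb : pvBest ws docs with
        | none => simp [hlt]
        | some p =>
          obtain ⟨k', d'⟩ := p
          by_cases h1 : pvKeyOf ws d ≤ k'
          · have h2 : ¬ k' < pvKeyOf ws d := by omega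
            have h3 : ¬ k' < k0 := by omega
            simp [h1, h2, h3, hlt]
          · have h2 : k' < pvKeyOf ws d := by omega
            simp [h1, h2]
    · rw [if_neg hk, if_neg hk, ih]

theorem pvFold_none (ws : List String) (docs : List String) :
    docs.foldl (pvBStep ws) none = pvBest ws docs := by
  induction docs with
  | nil => rfl
  | cons d docs ih =>
    simp only [List.foldl_cons, pvBStep, pvBest]
    by_cases hk : pvKeyOf ws d < ws.length
    · rw [if_pos hk, if_pos hk, pvFold_some]
      cases hb : pvBest ws docs with
      | none => rfl
      | some p =>
        obtain ⟨k', d'⟩ := p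
        by_cases h1 : pvKeyOf ws d ≤ k'
        · have h2 : ¬ k' < pvKeyOf ws d := by omega
          simp [h1, h2]
        · have h2 : k' < pvKeyOf ws d := by omega
          simp [h1, h2]
    · rw [if_neg hk, if_neg hk, ih]

-- ===== VERDICT (by name: the statement is the Claim_ definition above) =====
theorem get_document_link_spec : Claim_equal_get_document_link := by
  intro doc_list _
  unfold Spec_get_document_link get_document_link get_document_link_alt
  rw [pvFold_none, pvAWordLoop_eq_best]
  cases hb : pvBest pvAcceptedWords doc_list with
  | none =>
    cases doc_list.filter (fun doc => !(PySem.Str.isIn "press-release" doc)) <;> rfl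
  | some p => obtain ⟨k, d⟩ := p; rfl
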